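-- pv_equiv track=rewrite | github.com/xelixdev/invoice-processing-poc | backend/ai_engineering/document_matching.py | normalize_reference
-- ===== SOURCE A (Python) =====
-- def normalize_reference(reference: str) -> str:
--     """
--     Normalize a document reference number for comparison.
--
--     This removes common formatting variations to improve matching accuracy.
--     Works for various document types: PO numbers, invoice numbers, etc.
--
--     Args:
--         reference (str): Document reference number to normalize
--
--     Returns:
--         str: Normalized reference number
--
--     Example:
--         >>> normalize_reference("WBS2385-224")
--         "WBS2385224"
--         >>> normalize_reference("inv-2025-01-07-002")
--         "INV20250107002"
--     """
--     if not reference: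
--         return ""
--
--     # Convert to uppercase and strip whitespace
--     normalized = reference.upper().strip()
--
--     # Remove common separators
--     separators = ['-', '_', '.', ' ']
--     for separator in separators:
--         normalized = normalized.replace(separator, '')
--
--     return normalized
-- ===== SOURCE B (Python) =====
-- def normalize_reference(reference: str) -> str:
--     """Single filtering pass over the stripped uppercase string instead of four replace scans."""
--     if not reference:
--         return ""
--     separators = {'-', '_', '.', ' '}
--     return ''.join(c for c in reference.upper().strip() if c not in separators)
-- ===== Notes on version B (the rewrite author's own statement) =====
-- stated objective: simpler
-- what changed: Replaces the loop of four sequential str.replace passes with one character-level filter pass over the stripped uppercase string.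
import Mathlib
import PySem

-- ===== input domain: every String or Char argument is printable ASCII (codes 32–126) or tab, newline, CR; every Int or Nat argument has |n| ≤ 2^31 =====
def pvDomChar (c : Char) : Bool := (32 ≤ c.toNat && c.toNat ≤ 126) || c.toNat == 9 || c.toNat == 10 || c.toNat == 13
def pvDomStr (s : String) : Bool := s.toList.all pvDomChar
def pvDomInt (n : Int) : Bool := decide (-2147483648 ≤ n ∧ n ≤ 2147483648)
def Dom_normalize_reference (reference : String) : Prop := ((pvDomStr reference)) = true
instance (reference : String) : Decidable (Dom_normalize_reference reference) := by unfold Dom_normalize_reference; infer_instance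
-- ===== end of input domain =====

-- B replaces A's loop of four sequential str.replace passes with one character-level
-- filter pass over the stripped uppercase string (objective: simpler).
-- ===== PORT A =====
def normalize_reference (reference : String) : String :=
  if reference = "" then ""
  else
    let normalized := PySem.Str.strip (PySem.Str.upper reference)
    let separators : List String := ["-", "_", ".", " "]
    separators.foldl (fun normalized separator => PySem.Str.replace normalized separator "") normalized

-- ===== PORT B =====
def normalize_reference_alt (reference : String) : String :=
  if reference = "" then ""
  else
    let separators : PySem.Set Char := PySem.Set.ofList ['-', '_', '.', ' ']
    -- ''.join over the character generator = the string of the filtered character list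
    String.ofList ((PySem.Str.strip (PySem.Str.upper reference)).toList.filter
      (fun c => !(separators.contains c)))

-- ===== PRECONDITION & SPEC =====
def Spec_normalize_reference (reference : String) (out : String) : Prop := out = normalize_reference_alt reference
instance (reference : String) (out : String) : Decidable (Spec_normalize_reference reference out) := by unfold Spec_normalize_reference; infer_instance

-- ===== CLAIM (what is proved, stated in full; the proofs are below) =====
def Claim_equal_normalize_reference : Prop := ∀ (reference : String), Dom_normalize_reference reference → Spec_normalize_reference reference (normalize_reference reference)

-- ===== LEMMAS AND PROOFS =====

-- ===== VERDICT (by name: the statement is the Claim_ definition above) =====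
-- replace.go with a single-char pattern and empty replacement is a filter
lemma replace_go_step (a c : Char) (t acc : List Char) (f : Nat) :
    PySem.Chars.replace.go [a] [] (f+1) (c::t) acc =
      if a == c then PySem.Chars.replace.go [a] [] f t acc
      else PySem.Chars.replace.go [a] [] f t (c :: acc) := by
  simp only [PySem.Chars.replace.go, List.isPrefixOf, Bool.and_true, List.drop_succ_cons,
    List.drop_zero, List.length_cons, List.length_nil, List.reverse_nil, List.nil_append]

-- replace.go with a single-char pattern and empty replacement is a filter
lemma replace_go_filter (a : Char) (l acc : List Char) (fuel : Nat) (h : l.length <= fuel) :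
    PySem.Chars.replace.go [a] [] fuel l acc = acc.reverse ++ l.filter (fun c => !(c == a)) := by
  induction l generalizing fuel acc with
  | nil => cases fuel <;> simp [PySem.Chars.replace.go]
  | cons c t ih =>
    cases fuel with
    | zero => exact absurd h (by simp)
    | succ f =>
      rw [replace_go_step]
      by_cases hca : a = c
      · subst hca
        rw [if_pos (by simp), ih acc f (by simpa using Nat.le_of_succ_le_succ h)]
        simp
      · have hbe : (a == c) = false := beq_eq_false_iff_ne.mpr hca
        rw [if_neg (by simp [hca]), ih (c :: acc) f (by simpa using Nat.le_of_succ_le_succ h)]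
        simp [Ne.symm hca]

lemma replace_single_filter (cs : List Char) (a : Char) :
    PySem.Chars.replace cs [a] [] = cs.filter (fun c => !(c == a)) := by
  rw [PySem.Chars.replace]
  simp only [List.isEmpty_cons, Bool.false_eq_true, if_false]
  exact replace_go_filter a cs [] cs.length le_rfl

-- ===== VERDICT (by name: the statement is the Claim_ definition above) =====
theorem normalize_reference_spec : Claim_equal_normalize_reference := by
  intro reference _
  unfold Spec_normalize_reference normalize_reference normalize_reference_alt
  by_cases h : reference = ""
  · simp [h]
  · simp only [if_neg h]
    set s := PySem.Str.strip (PySem.Str.upper reference) with hs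
    apply String.ext
    simp only [List.foldl_cons, List.foldl_nil]
    rw [PySem.Str.toList_replace, PySem.Str.toList_replace, PySem.Str.toList_replace,
        PySem.Str.toList_replace]
    rw [show "-".toList = ['-'] from rfl, show "_".toList = ['_'] from rfl,
        show ".".toList = ['.'] from rfl, show " ".toList = [' '] from rfl,
        show "".toList = [] from rfl]
    simp only [String.toList_ofList]
    rw [replace_single_filter, replace_single_filter, replace_single_filter,
        replace_single_filter]
    simp only [List.filter_filter]
    apply List.filter_congr
    intro c _
    simp [PySem.Set.contains, PySem.Set.ofList]
    by_cases h1 : c = '-' <;> by_cases h2 : c = '_' <;> by_cases h3 : c = '.' <;>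
      by_cases h4 : c = ' ' <;> simp_all
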